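-- pv_equiv track=rewrite | github.com/mayaborkar/Advent | 2015/advent20b.py | find_lowest_house
-- ===== SOURCE A (Python) =====
-- def find_lowest_house(target):
--     # Estimate an upper limit to the search space
--     limit = target // 11
--     presents = [0] * (limit + 1)
--
--     for elf in range(1, limit + 1):
--         houses_visited = 0
--         for house in range(elf, limit + 1, elf):
--             if houses_visited < 50:
--                 presents[house] += elf * 11
--                 houses_visited += 1
--             else:
--                 break
--
--     for house_number, total_presents in enumerate(presents):
--         if total_presents >= target:
--             return house_number
--
--     return None
-- ===== SOURCE B (Python) =====
-- def _capped_divisor_sum(house):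
--     # sum of divisors e of house whose house//e <= 50 (elves stop after 50 houses),
--     # found by trial division up to sqrt(house), counting each divisor pair (d, q)
--     total = 0
--     d = 1
--     while d * d <= house:
--         if house % d == 0:
--             q = house // d
--             if q <= 50:
--                 total += d
--             if q != d and d <= 50:
--                 total += q
--         d += 1
--     return total
--
--
-- def find_lowest_house(target):
--     limit = target // 11
--     for house in range(limit + 1):
--         if 11 * _capped_divisor_sum(house) >= target:
--             return house
--     return None
-- ===== Notes on version B (the rewrite author's own statement) =====
-- stated objective: alternative
-- what changed: Replaces the elf-by-elf present sieve over a full array with a direct per-house computation: each house's total is obtained by trial division up to sqrt(house), summing the divisors whose quotient is at most 50, and the scan returns at the first qualifying house without ever building the array.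
import Mathlib
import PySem

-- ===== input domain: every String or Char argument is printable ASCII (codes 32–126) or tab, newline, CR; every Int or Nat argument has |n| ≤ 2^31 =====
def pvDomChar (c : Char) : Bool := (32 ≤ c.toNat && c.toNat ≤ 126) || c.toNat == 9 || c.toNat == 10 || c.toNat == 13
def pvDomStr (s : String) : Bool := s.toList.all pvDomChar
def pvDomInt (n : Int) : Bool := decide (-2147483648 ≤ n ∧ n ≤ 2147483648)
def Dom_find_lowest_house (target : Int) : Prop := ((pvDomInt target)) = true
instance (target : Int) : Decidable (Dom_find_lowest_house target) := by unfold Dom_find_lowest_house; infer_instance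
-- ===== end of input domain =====

-- B replaces A's elf-by-elf present sieve over a full array by computing each house's
-- total directly from its divisors (trial division up to sqrt, quotient capped at 50),
-- stopping at the first qualifying house; a genuinely different algorithm, not claimed faster.

-- ===== PORT A =====
-- inner 'for house in range(elf, limit+1, elf)' loop with the houses_visited-50 break;
-- the Python list 'presents' is held as an Array; 'h.toNat' is exact here because every
-- visited house index satisfies 1 ≤ h (multiples of elf ≥ 1), so no Python negative-index
-- wraparound can occur
def pvInnerA (elf : Int) (houses : List Int) (visited : Int) (p : Array Int) : Array Int :=
  match houses with
  | [] => p
  | h :: rest =>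
    if visited < 50 then
      pvInnerA elf rest (visited + 1)
        (p.setIfInBounds h.toNat (p.getD h.toNat 0 + elf * 11))
    else p

-- final 'for house_number, total_presents in enumerate(presents)' scan;
-- enumerate is rendered as an explicit running index house_number
def pvScanA (house_number : Int) (totals : List Int) (target : Int) : Option Int :=
  match totals with
  | [] => none
  | total_presents :: rest =>
    if total_presents ≥ target then some house_number
    else pvScanA (house_number + 1) rest target

def find_lowest_house (target : Int) : Option Int :=
  let limit := PySem.Int.floordiv target 11
  let presents : Array Int := Array.replicate (limit + 1).toNat 0
  let presents := (PySem.List.pyRange 1 (limit + 1) 1).foldl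
    (fun p elf => pvInnerA elf (PySem.List.pyRange elf (limit + 1) elf) 0 p) presents
  pvScanA 0 presents.toList target

-- ===== PORT B =====
-- the 'while d * d <= house' trial-division loop of _capped_divisor_sum
def pvDivLoop (house d total : Int) : Int :=
  if hd : d * d ≤ house then
    let total :=
      if PySem.Int.mod house d = 0 then
        let q := PySem.Int.floordiv house d
        let total := if q ≤ 50 then total + d else total
        if q ≠ d ∧ d ≤ 50 then total + q else total
      else total
    pvDivLoop house (d + 1) total
  else total
termination_by (house + 1 - d).toNat
decreasing_by
  have hdh : d ≤ house := le_trans (by nlinarith [sq_nonneg (2 * d - 1)]) hd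
  omega

-- 'for house in range(limit + 1)' scan of B
def pvScanB (houses : List Int) (target : Int) : Option Int :=
  match houses with
  | [] => none
  | house :: rest =>
    if 11 * pvDivLoop house 1 0 ≥ target then some house else pvScanB rest target

def find_lowest_house_alt (target : Int) : Option Int :=
  let limit := PySem.Int.floordiv target 11
  pvScanB (PySem.List.pyRange 0 (limit + 1) 1) target

-- ===== PRECONDITION & SPEC =====
def Spec_find_lowest_house (target : Int) (out : Option Int) : Prop := out = find_lowest_house_alt target
instance (target : Int) (out : Option Int) : Decidable (Spec_find_lowest_house target out) := by unfold Spec_find_lowest_house; infer_instance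

-- ===== CLAIM (what is proved, stated in full; the proofs are below) =====
def Claim_equal_find_lowest_house : Prop := ∀ (target : Int), Dom_find_lowest_house target → Spec_find_lowest_house target (find_lowest_house target)

-- ===== LEMMAS AND PROOFS =====

-- list model of pvInnerA (same computation on p.toList)
def pvInnerAL (elf : Int) (houses : List Int) (visited : Int) (p : List Int) : List Int :=
  match houses with
  | [] => p
  | h :: rest =>
    if visited < 50 then
      pvInnerAL elf rest (visited + 1) (p.set h.toNat (p.getD h.toNat 0 + elf * 11))
    else p

lemma arr_getD (a : Array Int) (i : Nat) (d : Int) : a.getD i d = a.toList.getD i d := by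
  rw [Array.getD, List.getD]
  split
  · rw [List.getElem?_eq_getElem (by simpa using ‹_›)]
    simp [Array.getElem_toList]
  · rw [List.getElem?_eq_none (by simp; omega)]
    rfl

lemma pvInnerA_toList (elf : Int) : ∀ (houses : List Int) (v : Int) (p : Array Int),
    (pvInnerA elf houses v p).toList = pvInnerAL elf houses v p.toList := by
  intro houses
  induction houses with
  | nil => intro v p; rfl
  | cons h rest ih =>
    intro v p
    by_cases hv : v < 50
    · rw [pvInnerA, if_pos hv, ih, pvInnerAL, if_pos hv,
        Array.toList_setIfInBounds, arr_getD]
    · rw [pvInnerA, if_neg hv, pvInnerAL, if_neg hv]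

lemma foldl_inner_toList (limit : Int) : ∀ (es : List Int) (p : Array Int),
    ((es.foldl (fun p e => pvInnerA e (PySem.List.pyRange e (limit + 1) e) 0 p) p).toList)
      = es.foldl (fun p e => pvInnerAL e (PySem.List.pyRange e (limit + 1) e) 0 p) p.toList := by
  intro es
  induction es with
  | nil => intro p; rfl
  | cons e es ih =>
    intro p
    rw [List.foldl_cons, List.foldl_cons, ih, pvInnerA_toList]

-- the single array update 'presents[house] += elf*11' as a function of the position
def pvStep (δ : Int) (p : List Int) (h : Int) : List Int :=
  p.set h.toNat (p.getD h.toNat 0 + δ)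

-- the common spec of a house total: 11 * (sum of divisors e of k with k ≤ 50 e)
def pvT (k : Int) : Int :=
  ((PySem.List.pyRange 1 (k + 1) 1).map (fun e => if e ∣ k ∧ k ≤ 50 * e then e else 0)).sum

-- divisors of h not yet counted when B's trial division has reached d
def pvR (h d : Int) : Int :=
  ((PySem.List.pyRange 1 (h + 1) 1).map
    (fun e => if e ∣ h ∧ h ≤ 50 * e ∧ d ≤ e ∧ d ≤ h / e then e else 0)).sum

-- A's inner loop = fold of pvStep over the first (50 - visited) houses
lemma pvInnerAL_eq_foldl (elf : Int) : ∀ (houses : List Int) (v : Int) (p : List Int),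
    pvInnerAL elf houses v p =
      (houses.take (50 - v).toNat).foldl (pvStep (elf * 11)) p := by
  intro houses
  induction houses with
  | nil => intro v p; simp [pvInnerAL]
  | cons h rest ih =>
    intro v p
    by_cases hv : v < 50
    · have h50 : (50 - v).toNat = (50 - (v + 1)).toNat + 1 := by omega
      rw [pvInnerAL, if_pos hv, h50, List.take_succ_cons, List.foldl_cons, ih]
      rfl
    · have h50 : (50 - v).toNat = 0 := by omega
      rw [pvInnerAL, if_neg hv, h50, List.take_zero, List.foldl_nil]

lemma foldl_pvStep_length (δ : Int) : ∀ (us : List Int) (p : List Int),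
    ((us.foldl (pvStep δ) p).length) = p.length := by
  intro us
  induction us with
  | nil => intro p; rfl
  | cons j us ih =>
    intro p
    rw [List.foldl_cons, ih]
    simp [pvStep]

lemma foldl_pvStep_get (δ : Int) : ∀ (us : List Int) (p : List Int), us.Nodup →
    (∀ j ∈ us, 0 ≤ j ∧ j < (p.length : Int)) →
    ∀ (k : Nat) (hk : k < p.length),
      (us.foldl (pvStep δ) p)[k]? =
        some (p[k] + (if (k : Int) ∈ us then δ else 0)) := by
  intro us
  induction us with
  | nil => intro p _ _ k hk; simp [List.getElem?_eq_getElem hk]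
  | cons j us ih =>
    intro p hnd hb k hk
    have hj := hb j (List.mem_cons_self ..)
    have hstep : pvStep δ p j = p.set j.toNat (p[j.toNat]'(by omega) + δ) := by
      rw [pvStep, List.getD_eq_getElem p 0 (by omega)]
    have hlen : (pvStep δ p j).length = p.length := by
      rw [hstep]; simp
    rw [List.foldl_cons, ih (pvStep δ p j) hnd.of_cons
      (by intro x hx; rw [hlen]; exact hb x (List.mem_cons_of_mem _ hx)) k (by omega)]
    by_cases hkj : (k : Int) = j
    · have hk' : j.toNat = k := by omega
      have hknot : (k : Int) ∉ us := by
        rw [hkj]; exact (List.nodup_cons.mp hnd).1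
      subst hk'
      simp only [hstep, List.getElem_set_self, if_neg hknot, List.mem_cons,
        if_pos (Or.inl hkj), add_zero]
    · have hk' : j.toNat ≠ k := by omega
      have : ((k : Int) ∈ j :: us) = ((k : Int) ∈ us) := by
        simp [List.mem_cons, hkj]
      simp only [hstep, List.getElem_set_ne hk', this]

-- normal form of the first 50 multiples of e inside the array
lemma take50_norm (e limit : Int) (he : 1 ≤ e) :
    (PySem.List.pyRange e (limit + 1) e).take 50 =
      (List.range (min 50 (if e < limit + 1 then (limit / e).toNat else 0))).map
        (fun i : Nat => e + e * (i : Int)) := by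
  rw [PySem.List.pyRange_of_pos _ _ (by omega : (0:Int) < e)]
  have hnum : limit + 1 - e + e - 1 = limit := by ring
  rw [hnum, ← List.map_take, List.take_range]

-- the houses elf e actually visits: multiples e·m, 1 ≤ m ≤ 50, within the array
lemma take50_nodup (e limit : Int) (he : 1 ≤ e) :
    ((PySem.List.pyRange e (limit + 1) e).take 50).Nodup := by
  rw [take50_norm e limit he]
  refine List.Nodup.map ?_ (List.nodup_range)
  intro i j hij
  simp only [] at hij
  have h1 : e * (i : Int) = e * (j : Int) := by omega
  have h2 : (i : Int) = (j : Int) :=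
    mul_left_cancel₀ (by omega : (e : Int) ≠ 0) h1
  exact_mod_cast h2

lemma take50_bounds (e limit : Int) (he : 1 ≤ e) :
    ∀ j ∈ (PySem.List.pyRange e (limit + 1) e).take 50, 1 ≤ j ∧ j ≤ limit := by
  rw [take50_norm e limit he]
  intro j hj
  obtain ⟨i, hi, rfl⟩ := List.mem_map.mp hj
  rw [List.mem_range] at hi
  by_cases hlt : e < limit + 1
  swap
  · rw [if_neg hlt] at hi; omega
  rw [if_pos hlt] at hi
  have hi2 : ((i : Int) + 1) ≤ limit / e := by omega
  have := (Int.le_ediv_iff_mul_le (by omega : (0:Int) < e)).mp hi2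
  constructor
  · nlinarith
  · nlinarith

lemma take50_mem (e limit : Int) (he : 1 ≤ e) (k : Int) (_hk0 : 0 ≤ k) (hkl : k ≤ limit) :
    (k ∈ (PySem.List.pyRange e (limit + 1) e).take 50) ↔
      (e ∣ k ∧ e ≤ k ∧ k ≤ 50 * e) := by
  rw [take50_norm e limit he]
  constructor
  · intro hmem
    obtain ⟨i, hi, rfl⟩ := List.mem_map.mp hmem
    rw [List.mem_range] at hi
    refine ⟨⟨(i : Int) + 1, by ring⟩, by nlinarith [Int.natCast_nonneg i], ?_⟩
    have : (i : Int) + 1 ≤ 50 := by omega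
    nlinarith
  · rintro ⟨⟨c, rfl⟩, hec, hcap⟩
    have hc1 : 1 ≤ c := by nlinarith
    have hc50 : c ≤ 50 := by nlinarith
    have hel : e ≤ limit := le_trans hec hkl
    have hcd : c ≤ limit / e := (Int.le_ediv_iff_mul_le (by omega : (0:Int) < e)).mpr
      (by nlinarith)
    refine List.mem_map.mpr ⟨(c - 1).toNat, ?_, ?_⟩
    · rw [List.mem_range, if_pos (by omega : e < limit + 1)]
      have h0 : 0 ≤ limit / e := le_trans (by omega) hcd
      omega
    · have : ((c - 1).toNat : Int) = c - 1 := by omega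
      rw [this]; ring

-- the outer elf fold, pointwise
lemma outer_length (limit : Int) : ∀ (es : List Int) (p : List Int), (∀ e ∈ es, 1 ≤ e) →
    ((es.foldl (fun p e => pvInnerAL e (PySem.List.pyRange e (limit + 1) e) 0 p) p).length)
      = p.length := by
  intro es
  induction es with
  | nil => intro p _; rfl
  | cons e es ih =>
    intro p hes
    rw [List.foldl_cons, ih _ (fun x hx => hes x (List.mem_cons_of_mem _ hx)),
      pvInnerAL_eq_foldl, foldl_pvStep_length]

lemma outer_get (limit : Int) : ∀ (es : List Int) (p : List Int) (_hes : ∀ e ∈ es, 1 ≤ e),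
    (p.length : Int) = limit + 1 →
    ∀ (k : Nat) (hk : k < p.length),
      ((es.foldl (fun p e => pvInnerAL e (PySem.List.pyRange e (limit + 1) e) 0 p) p)[k]?) =
        some (p[k] + ((es.map (fun e =>
          if e ∣ (k : Int) ∧ e ≤ (k : Int) ∧ (k : Int) ≤ 50 * e then e * 11 else 0)).sum)) := by
  intro es
  induction es with
  | nil =>
    intro p _ _ k hk
    simp [List.getElem?_eq_getElem hk]
  | cons e es ih =>
    intro p hes hlen k hk
    have he1 : 1 ≤ e := hes e (List.mem_cons_self ..)
    have hes' : ∀ x ∈ es, 1 ≤ x := fun x hx => hes x (List.mem_cons_of_mem _ hx)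
    set p' := pvInnerAL e (PySem.List.pyRange e (limit + 1) e) 0 p with hp'
    have hstep : p' = ((PySem.List.pyRange e (limit + 1) e).take (((50 : Int) - 0).toNat)).foldl
        (pvStep (e * 11)) p := pvInnerAL_eq_foldl e _ 0 p
    have h50 : ((50 : Int) - 0).toNat = 50 := by decide
    rw [h50] at hstep
    have hb : ∀ j ∈ (PySem.List.pyRange e (limit + 1) e).take 50,
        0 ≤ j ∧ j < (p.length : Int) := by
      intro j hj
      have := take50_bounds e limit he1 j hj
      omega
    have hget : p'[k]? = some (p[k] +
        (if (k : Int) ∈ (PySem.List.pyRange e (limit + 1) e).take 50 then e * 11 else 0)) := by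
      rw [hstep]
      exact foldl_pvStep_get (e * 11) _ p (take50_nodup e limit he1) hb k hk
    have hlen' : p'.length = p.length := by
      rw [hstep, foldl_pvStep_length]
    have hk' : k < p'.length := by omega
    have hval : p'[k]'hk' = p[k] +
        (if e ∣ (k : Int) ∧ e ≤ (k : Int) ∧ (k : Int) ≤ 50 * e then e * 11 else 0) := by
      have h2 := (List.getElem?_eq_getElem hk').symm.trans hget
      simp only [take50_mem e limit he1 k (by omega) (by omega)] at h2
      exact Option.some.inj h2
    rw [List.foldl_cons, ← hp',
      ih p' hes' (by omega) k (by omega), hval, List.map_cons, List.sum_cons]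
    ring_nf

-- list sum over a step-1 range = Finset sum over Ico
lemma sum_map_pyRange (a b : Int) (g : Int → Int) :
    ((PySem.List.pyRange a b 1).map g).sum = ∑ e ∈ Finset.Ico a b, g e := by
  have hfs : (PySem.List.pyRange a b 1).toFinset = Finset.Ico a b := by
    ext x
    simp [List.mem_toFinset, PySem.List.mem_pyRange_one, Finset.mem_Ico]
  rw [← hfs, List.sum_toFinset g (PySem.List.nodup_pyRange_one a b)]

lemma pvT_eq_finset (k : Int) :
    pvT k = ∑ e ∈ Finset.Icc 1 k, (if e ∣ k ∧ k ≤ 50 * e then e else 0) := by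
  rw [pvT, sum_map_pyRange]
  apply Finset.sum_congr _ (fun _ _ => rfl)
  ext x
  simp only [Finset.mem_Ico, Finset.mem_Icc]
  omega

-- one summand of pvR
def pvF (h d e : Int) : Int :=
  if e ∣ h ∧ h ≤ 50 * e ∧ d ≤ e ∧ d ≤ h / e then e else 0

lemma pvR_eq_finset (h d : Int) :
    pvR h d = ∑ e ∈ Finset.Icc 1 h, pvF h d e := by
  rw [pvR, sum_map_pyRange]
  apply Finset.sum_congr _ (fun _ _ => rfl)
  ext x
  simp only [Finset.mem_Ico, Finset.mem_Icc]
  omega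

lemma pvF_congr (h d e : Int) (hne : e ∣ h → e ≠ d) (hq : e ∣ h → h / e ≠ d) :
    pvF h d e = pvF h (d + 1) e := by
  by_cases hdvd : e ∣ h
  · rw [pvF, pvF]
    apply if_congr _ rfl rfl
    have h1 := hne hdvd
    have h2 := hq hdvd
    constructor
    · rintro ⟨a, b, c, dd⟩; exact ⟨a, b, by omega, by omega⟩
    · rintro ⟨a, b, c, dd⟩; exact ⟨a, b, by omega, by omega⟩
  · rw [pvF, pvF, if_neg (fun hx => hdvd hx.1), if_neg (fun hx => hdvd hx.1)]

-- if e divides h and its cofactor is d, then e is the cofactor of d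
lemma cofactor_eq (h d e : Int) (hd0 : d ≠ 0) (hedvd : e ∣ h) (heq : h / e = d) :
    e = h / d := by
  have hmul : h = e * d := by rw [← heq]; exact (Int.mul_ediv_cancel' hedvd).symm
  rw [hmul, Int.mul_ediv_cancel e hd0]

lemma pvR_zero (h d : Int) (hd1 : 1 ≤ d) (hd : ¬ d * d ≤ h) : pvR h d = 0 := by
  rw [pvR_eq_finset]
  apply Finset.sum_eq_zero
  intro e he
  rw [Finset.mem_Icc] at he
  rw [pvF, if_neg]
  rintro ⟨hdvd, _, hde, hdq⟩
  apply hd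
  calc d * d ≤ e * (h / e) := mul_le_mul hde hdq (by omega) (by omega)
    _ = h := Int.mul_ediv_cancel' hdvd

lemma pvR_step (h d : Int) (hd1 : 1 ≤ d) (hdd : d * d ≤ h) :
    pvR h d = pvR h (d + 1) +
      (if d ∣ h then
        (if h / d ≤ 50 then d else 0) +
          (if h / d ≠ d ∧ d ≤ 50 then h / d else 0)
      else 0) := by
  have hh1 : 1 ≤ h := by nlinarith
  have hdh : d ≤ h := by nlinarith
  have hd0 : d ≠ 0 := by omega
  rw [pvR_eq_finset, pvR_eq_finset]
  by_cases hdvd : d ∣ h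
  · have hqd : h / d * d = h := Int.ediv_mul_cancel hdvd
    have hdq : d ≤ h / d := by
      apply le_of_mul_le_mul_right _ (by omega : (0:Int) < d)
      nlinarith
    have hq1 : (1:Int) ≤ h / d := by omega
    have hqh : h / d ≤ h := by nlinarith
    have hqdvd : h / d ∣ h := ⟨d, hqd.symm⟩
    have hqq : h / (h / d) = d := by
      obtain ⟨c, hc⟩ := hdvd
      have hc0 : c ≠ 0 := by
        rintro rfl
        rw [hc] at hh1
        simp at hh1
      rw [hc, Int.mul_ediv_cancel_left c hd0, mul_comm,
        Int.mul_ediv_cancel_left d hc0]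
    have hdmem : d ∈ Finset.Icc 1 h := Finset.mem_Icc.mpr ⟨hd1, hdh⟩
    have hFd : pvF h d d = if h / d ≤ 50 then d else 0 := by
      rw [pvF]
      by_cases hq50 : h / d ≤ 50
      · rw [if_pos ⟨hdvd, by nlinarith, le_refl d, hdq⟩, if_pos hq50]
      · rw [if_neg, if_neg hq50]
        rintro ⟨_, hcap, _, _⟩
        apply hq50
        nlinarith
    have hFd1 : pvF h (d + 1) d = 0 := by
      rw [pvF, if_neg]; rintro ⟨_, _, hc, _⟩; omega
    rw [if_pos hdvd]
    by_cases hqd' : h / d = d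
    · have hrest : ∑ e ∈ (Finset.Icc 1 h).erase d, pvF h d e =
          ∑ e ∈ (Finset.Icc 1 h).erase d, pvF h (d + 1) e := by
        apply Finset.sum_congr rfl
        intro e he
        have hed : e ≠ d := (Finset.mem_erase.mp he).1
        refine pvF_congr h d e (fun _ => hed) (fun hedvd heq => ?_)
        exact hed ((cofactor_eq h d e hd0 hedvd heq).trans hqd')
      have hzero : (if h / d ≠ d ∧ d ≤ 50 then h / d else 0) = 0 :=
        if_neg (fun hx => hx.1 hqd')
      rw [← Finset.add_sum_erase _ (pvF h d) hdmem,
        ← Finset.add_sum_erase _ (pvF h (d + 1)) hdmem, hrest, hFd, hFd1, hzero]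
      ring
    · have hqmem' : h / d ∈ (Finset.Icc 1 h).erase d :=
        Finset.mem_erase.mpr ⟨hqd', Finset.mem_Icc.mpr ⟨hq1, hqh⟩⟩
      have hFq : pvF h d (h / d) = if d ≤ 50 then h / d else 0 := by
        rw [pvF]
        by_cases hd50 : d ≤ 50
        · rw [if_pos ⟨hqdvd, by nlinarith, hdq, by omega⟩, if_pos hd50]
        · rw [if_neg, if_neg hd50]
          rintro ⟨_, hcap, _, _⟩
          apply hd50
          nlinarith
      have hFq1 : pvF h (d + 1) (h / d) = 0 := by
        rw [pvF, if_neg]; rintro ⟨_, _, _, hc⟩; omega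
      have hrest : ∑ e ∈ ((Finset.Icc 1 h).erase d).erase (h / d), pvF h d e =
          ∑ e ∈ ((Finset.Icc 1 h).erase d).erase (h / d), pvF h (d + 1) e := by
        apply Finset.sum_congr rfl
        intro e he
        have heq' := Finset.mem_erase.mp he
        have hed : e ≠ d := (Finset.mem_erase.mp heq'.2).1
        refine pvF_congr h d e (fun _ => hed) (fun hedvd heq => ?_)
        exact heq'.1 (cofactor_eq h d e hd0 hedvd heq)
      have hsplit : (if h / d ≠ d ∧ d ≤ 50 then h / d else 0) =
          (if d ≤ 50 then h / d else 0) := by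
        by_cases hd50 : d ≤ 50
        · rw [if_pos ⟨hqd', hd50⟩, if_pos hd50]
        · rw [if_neg (fun hx => hd50 hx.2), if_neg hd50]
      rw [← Finset.add_sum_erase _ (pvF h d) hdmem,
        ← Finset.add_sum_erase _ (pvF h d) hqmem',
        ← Finset.add_sum_erase _ (pvF h (d + 1)) hdmem,
        ← Finset.add_sum_erase _ (pvF h (d + 1)) hqmem',
        hrest, hFd, hFd1, hFq, hFq1, hsplit]
      ring
  · rw [if_neg hdvd, add_zero]
    apply Finset.sum_congr rfl
    intro e he
    apply pvF_congr h d e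
    · intro hedvd hed
      exact hdvd (hed ▸ hedvd)
    · intro hedvd heq
      apply hdvd
      have hmul : h = e * d := by rw [← heq]; exact (Int.mul_ediv_cancel' hedvd).symm
      exact ⟨e, by rw [hmul, mul_comm]⟩

-- restricting the elf sum to the divisors of k gives 11 * pvT k
lemma sum_cond_eq_pvT (limit k : Int) (_hk0 : 0 ≤ k) (hkl : k ≤ limit) :
    (∑ e ∈ Finset.Ico 1 (limit + 1), (if e ∣ k ∧ e ≤ k ∧ k ≤ 50 * e then e * 11 else 0))
      = 11 * pvT k := by
  have h1 : Finset.Ico (1 : Int) (limit + 1) = Finset.Icc 1 limit := by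
    ext x
    simp only [Finset.mem_Ico, Finset.mem_Icc]
    omega
  rw [h1, pvT_eq_finset, Finset.mul_sum,
    ← Finset.sum_subset (Finset.Icc_subset_Icc_right hkl :
      Finset.Icc 1 k ⊆ Finset.Icc 1 limit)]
  · apply Finset.sum_congr rfl
    intro e he
    rw [Finset.mem_Icc] at he
    by_cases hc : e ∣ k ∧ k ≤ 50 * e
    · rw [if_pos ⟨hc.1, he.2, hc.2⟩, if_pos hc]; ring
    · rw [if_neg (fun hx => hc ⟨hx.1, hx.2.2⟩), if_neg hc]; ring
  · intro e he hne
    rw [Finset.mem_Icc] at he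
    rw [Finset.mem_Icc] at hne
    rw [if_neg]
    rintro ⟨_, hek, _⟩
    omega

-- B's trial-division loop counts each divisor at step min(e, h/e)
lemma pvDivLoop_eq (h : Int) : ∀ (n : Nat) (d total : Int), 1 ≤ d →
    (h + 1 - d).toNat ≤ n → pvDivLoop h d total = total + pvR h d := by
  intro n
  induction n with
  | zero =>
    intro d total hd1 hn
    have hdd : ¬ d * d ≤ h := by nlinarith [show h < d by omega]
    rw [pvDivLoop, dif_neg hdd, pvR_zero h d hd1 hdd]
    ring
  | succ n ih =>
    intro d total hd1 hn
    by_cases hdd : d * d ≤ h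
    · have hdh : d ≤ h := by nlinarith
      rw [pvDivLoop, dif_pos hdd]
      simp only [PySem.Int.mod_eq_zero_iff_dvd,
        PySem.Int.floordiv_eq_ediv_of_pos (show (0:Int) < d by omega)]
      rw [ih (d + 1) _ (by omega) (by omega), pvR_step h d hd1 hdd]
      by_cases hdvd : d ∣ h
      · rw [if_pos hdvd, if_pos hdvd]
        split_ifs <;> ring
      · rw [if_neg hdvd, if_neg hdvd]
        ring
    · rw [pvDivLoop, dif_neg hdd, pvR_zero h d hd1 hdd]
      ring

lemma pvR_one (h : Int) : pvR h 1 = pvT h := by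
  rw [pvR_eq_finset, pvT_eq_finset]
  apply Finset.sum_congr rfl
  intro e he
  rw [Finset.mem_Icc] at he
  rw [pvF]
  apply if_congr _ rfl rfl
  constructor
  · rintro ⟨a, b, _, _⟩; exact ⟨a, b⟩
  · rintro ⟨a, b⟩
    exact ⟨a, b, he.1,
      (Int.le_ediv_iff_mul_le (by omega : (0:Int) < e)).mpr (by omega)⟩

lemma pvDivLoop_val (h : Int) : pvDivLoop h 1 0 = pvT h := by
  rw [pvDivLoop_eq h (h + 1 - 1).toNat 1 0 le_rfl le_rfl, pvR_one, zero_add]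

-- the two final scans agree when the stored totals are B's totals
lemma scan_eq (t : Int) : ∀ (P : List Int) (s : Int),
    (∀ (k : Nat) (hk : k < P.length), P[k] = 11 * pvDivLoop (s + k) 1 0) →
    pvScanA s P t =
      pvScanB (PySem.List.pyRange s (s + P.length) 1) t := by
  intro P
  induction P with
  | nil =>
    intro s _
    rw [show ((([] : List Int).length : Int)) = 0 by simp, add_zero,
      PySem.List.pyRange_one_eq_nil (le_refl s)]
    rfl
  | cons x xs ih =>
    intro s hv
    have hx : x = 11 * pvDivLoop s 1 0 := by
      have h0 := hv 0 (by simp)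
      simpa using h0
    have hlen : s + (((x :: xs).length : Nat) : Int) = (s + 1) + (xs.length : Int) := by
      push_cast [List.length_cons]
      ring
    rw [hlen,
      PySem.List.pyRange_one_cons (by omega : s < s + 1 + (xs.length : Int)), pvScanA, pvScanB,
      ← hx]
    by_cases hc : x ≥ t
    · rw [if_pos hc, if_pos hc]
    · rw [if_neg hc, if_neg hc]
      rw [ih (s + 1) ?_]
      intro k hk
      have hk1 := hv (k + 1) (by simpa using hk)
      have : s + ((k : Int) + 1) = s + 1 + (k : Int) := by ring
      simpa [this] using hk1

-- ===== VERDICT (by name: the statement is the Claim_ definition above) =====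
theorem find_lowest_house_spec : Claim_equal_find_lowest_house := by
  unfold Claim_equal_find_lowest_house Spec_find_lowest_house
  intro target _
  simp only [find_lowest_house, find_lowest_house_alt]
  by_cases hl : 0 ≤ PySem.Int.floordiv target 11
  · set limit := PySem.Int.floordiv target 11 with hlim
    rw [show ((PySem.List.pyRange 1 (limit + 1) 1).foldl
        (fun p elf => pvInnerA elf (PySem.List.pyRange elf (limit + 1) elf) 0 p)
        (Array.replicate (limit + 1).toNat 0)).toList =
        (PySem.List.pyRange 1 (limit + 1) 1).foldl
        (fun p elf => pvInnerAL elf (PySem.List.pyRange elf (limit + 1) elf) 0 p)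
        (List.replicate (limit + 1).toNat 0) from by
      rw [foldl_inner_toList, Array.toList_replicate]]
    set P0 : List Int := List.replicate (limit + 1).toNat 0 with hP0
    set P := (PySem.List.pyRange 1 (limit + 1) 1).foldl
      (fun p elf => pvInnerAL elf (PySem.List.pyRange elf (limit + 1) elf) 0 p) P0 with hP
    have hes : ∀ e ∈ PySem.List.pyRange 1 (limit + 1) 1, 1 ≤ e := by
      intro e he
      rw [PySem.List.mem_pyRange_one] at he
      omega
    have hlen0 : (P0.length : Int) = limit + 1 := by
      rw [hP0, List.length_replicate]
      omega
    have hlenP : P.length = P0.length := outer_length limit _ P0 hes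
    have hval : ∀ (k : Nat) (hk : k < P.length), P[k] = 11 * pvDivLoop ((0 : Int) + k) 1 0 := by
      intro k hk
      have hk0 : k < P0.length := by omega
      have h1 := outer_get limit _ P0 hes hlen0 k hk0
      have h2 := (List.getElem?_eq_getElem hk).symm.trans h1
      have h3 : P0[k]'hk0 = 0 := by
        simp [hP0]
      rw [h3, zero_add] at h2
      have h4 := Option.some.inj h2
      rw [h4, sum_map_pyRange 1 (limit + 1)
        (fun e => if e ∣ (k : Int) ∧ e ≤ (k : Int) ∧ (k : Int) ≤ 50 * e then e * 11 else 0),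
        sum_cond_eq_pvT limit k (by omega) (by omega), zero_add, pvDivLoop_val]
    have hmain := scan_eq target P 0 hval
    rw [hmain]
    have hbound : (0 : Int) + (P.length : Int) = limit + 1 := by omega
    rw [hbound]
  · have hneg : PySem.Int.floordiv target 11 + 1 ≤ 0 := by omega
    have h0 : (PySem.Int.floordiv target 11 + 1).toNat = 0 := by omega
    rw [h0, PySem.List.pyRange_one_eq_nil (by omega : PySem.Int.floordiv target 11 + 1 ≤ 1),
      PySem.List.pyRange_one_eq_nil (by omega : PySem.Int.floordiv target 11 + 1 ≤ 0),
      List.foldl_nil, Array.toList_replicate]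
    rfl
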